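-- pv_equiv track=rewrite | github.com/fpolit/ama-framework | ama/core/plugins/cracker/mask.py | _genIterMask
-- ===== SOURCE A (Python) =====
-- def _genIterMask(mask, inverse=False):
--     if inverse:
--         inverseMask = ""
--         for charset in mask[::-2]:
--             inverseMask += f"?{charset}"
--         iterMask = iter(inverseMask)
--
--     else:
--         iterMask = iter(mask)
--
--     maskSymbol = next(iterMask, "") + next(iterMask, "")
--     while maskSymbol:
--         yield maskSymbol
--         maskSymbol = next(iterMask, "") + next(iterMask, "")
-- ===== SOURCE B (Python) =====
-- def _genIterMask(mask, inverse=False):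
--     if inverse:
--         for charset in mask[::-2]:
--             yield f"?{charset}"
--     else:
--         for i in range(0, len(mask), 2):
--             yield mask[i:i+2]
-- ===== Notes on version B (the rewrite author's own statement) =====
-- stated objective: simpler
-- what changed: Replaces the sentinel-next() iterator pairing (and, in the inverse case, the intermediate string buildup) with direct index-based 2-char slices over range(0,len,2), and in the inverse case yields one question-mark pair per charset directly.
import Mathlib
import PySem

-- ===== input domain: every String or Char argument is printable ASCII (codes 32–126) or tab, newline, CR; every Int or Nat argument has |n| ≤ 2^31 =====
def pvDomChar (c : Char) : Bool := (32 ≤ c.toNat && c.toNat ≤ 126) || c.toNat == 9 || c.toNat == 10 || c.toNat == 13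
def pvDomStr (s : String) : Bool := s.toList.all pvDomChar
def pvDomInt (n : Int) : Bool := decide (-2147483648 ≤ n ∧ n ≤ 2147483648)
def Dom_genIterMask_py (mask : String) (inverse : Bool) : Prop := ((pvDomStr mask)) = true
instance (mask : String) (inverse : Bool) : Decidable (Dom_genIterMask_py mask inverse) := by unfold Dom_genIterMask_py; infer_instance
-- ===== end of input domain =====

-- B replaces A's sentinel-next() iterator pairing (and the inverse-case string buildup)
-- with direct index-based 2-char slices / per-charset '?c' pairs; objective: simpler.

-- ===== PORT A =====
-- A's while loop: maskSymbol = next(it,"") + next(it,""); while maskSymbol: yield; refill.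
def pvNextPairs : List Char → List String
  | [] => []
  | [c] => [String.ofList [c]]
  | c1 :: c2 :: rest => String.ofList [c1, c2] :: pvNextPairs rest

def genIterMask_py (mask : String) (inverse : Bool) : List String :=
  if inverse then
    -- inverseMask = ""; for charset in mask[::-2]: inverseMask += f"?{charset}"
    let rev2 := (PySem.Chars.slice? mask.toList none none (-2)).getD []
    let inverseMask := rev2.foldl (fun acc c => acc ++ ['?', c]) []
    pvNextPairs inverseMask
  else
    pvNextPairs mask.toList

-- ===== PORT B =====
def genIterMask_py_alt (mask : String) (inverse : Bool) : List String :=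
  if inverse then
    -- for charset in mask[::-2]: yield f"?{charset}"
    ((PySem.Chars.slice? mask.toList none none (-2)).getD []).map (fun c => String.ofList ['?', c])
  else
    -- for i in range(0, len(mask), 2): yield mask[i:i+2]
    (PySem.List.pyRange 0 (mask.toList.length : Int) 2).map
      (fun i => String.ofList (PySem.Chars.slice mask.toList (some i) (some (i + 2))))

-- ===== PRECONDITION & SPEC =====
def Spec_genIterMask_py (mask : String) (inverse : Bool) (out : List String) : Prop := out = genIterMask_py_alt mask inverse
instance (mask : String) (inverse : Bool) (out : List String) : Decidable (Spec_genIterMask_py mask inverse out) := by unfold Spec_genIterMask_py; infer_instance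

-- ===== CLAIM (what is proved, stated in full; the proofs are below) =====
def Claim_equal_genIterMask_py : Prop := ∀ (mask : String) (inverse : Bool), Dom_genIterMask_py mask inverse → Spec_genIterMask_py mask inverse (genIterMask_py mask inverse)

-- ===== LEMMAS AND PROOFS =====

-- inverse case: pairing the string "?c1?c2…" back up gives exactly one "?c" per charset
theorem pvNextPairs_flatMap (cs : List Char) :
    pvNextPairs (cs.flatMap (fun c => ['?', c])) = cs.map (fun c => String.ofList ['?', c]) := by
  induction cs with
  | nil => rfl
  | cons c cs ih => simp [List.flatMap_cons, pvNextPairs, ih]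

-- non-inverse case, take/drop form of the index-chunking
theorem pvNextPairs_chunks (l : List Char) :
    pvNextPairs l = (List.range ((l.length + 1) / 2)).map
      (fun k => String.ofList ((l.drop (2 * k)).take 2)) := by
  induction l using pvNextPairs.induct with
  | case1 => rfl
  | case2 c => simp [pvNextPairs, List.range_succ]
  | case3 c1 c2 rest ih =>
      have hm : ((c1 :: c2 :: rest).length + 1) / 2 = (rest.length + 1) / 2 + 1 := by
        simp only [List.length_cons]; omega
      rw [hm, List.range_succ_eq_map, List.map_cons, List.map_map]
      have ht : (List.range ((rest.length + 1) / 2)).map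
          ((fun k => String.ofList (((c1 :: c2 :: rest).drop (2 * k)).take 2)) ∘ (fun n => n + 1))
          = pvNextPairs rest := by
        rw [ih]
        apply List.map_congr_left
        intro k _
        have h : 2 * (k + 1) = 2 * k + 2 := by omega
        simp [Function.comp, h]
      rw [ht]
      rfl

-- B's range/slice loop in the same take/drop form
theorem alt_chunks (l : List Char) :
    (PySem.List.pyRange 0 (l.length : Int) 2).map
        (fun i => String.ofList (PySem.Chars.slice l (some i) (some (i + 2))))
      = (List.range ((l.length + 1) / 2)).map
        (fun k => String.ofList ((l.drop (2 * k)).take 2)) := by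
  rw [PySem.List.pyRange_of_pos 0 (l.length : Int) (by norm_num), List.map_map]
  have hm : (if (0:Int) < (l.length : Int) then (((l.length : Int) - 0 + 2 - 1) / 2).toNat else 0)
      = (l.length + 1) / 2 := by
    split_ifs with h
    · omega
    · omega
  rw [hm]
  apply List.map_congr_left
  intro k _
  have h1 : (0 : Int) + 2 * (k : Int) = ((2 * k : Nat) : Int) := by push_cast; ring
  have h2 : ((2 * k : Nat) : Int) + 2 = ((2 * k : Nat) : Int) + ((2 : Nat) : Int) := by norm_num
  simp only [Function.comp, PySem.Chars.slice_eq_listSlice, h1, h2,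
    PySem.List.slice_natCast_add]

-- ===== VERDICT (by name: the statement is the Claim_ definition above) =====
theorem genIterMask_py_spec : Claim_equal_genIterMask_py := by
  intro mask inverse _
  unfold Spec_genIterMask_py genIterMask_py genIterMask_py_alt
  cases inverse with
  | false =>
      simp only [Bool.false_eq_true, if_false]
      rw [pvNextPairs_chunks, alt_chunks]
  | true =>
      simp only [if_true]
      rw [PySem.List.foldl_append_eq_flatMap, List.nil_append, pvNextPairs_flatMap]
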